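-- pv_equiv track=rewrite | github.com/AdrianSuliga/WDI | Kolokwia/ex_2B_20.py | areNumsGood
-- ===== SOURCE A (Python) =====
-- def areNumsGood(num1, num2): # sprawdź czy 2 liczby są zgodne siódemkowo
--     num1_7 = DecTo7Base(num1)
--     num2_7 = DecTo7Base(num2) # postacie num1 i num2 w systemie siódemkowym
--     oddNumsInN1, oddNumsInN2 = 0, 0
--     while num1_7 != 0:
--         if num1_7 % 2 == 1: oddNumsInN1 += 1
--         num1_7 //= 10
--     while num2_7 != 0:
--         if num2_7 % 2 == 1: oddNumsInN2 += 1
--         num2_7 //= 10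
--     if oddNumsInN1 == oddNumsInN2: return True
--     else: return False
--
-- def DecTo7Base(n): # konwertuj liczbę dziesiętną na siódemkową
--     res, it = 0, 0
--     while n != 0:
--         res += (n % 7) * 10**it
--         n //= 7
--         it += 1
--     return res
-- ===== SOURCE B (Python) =====
-- def areNumsGood(num1, num2):
--     # Count odd base-7 digits of each number directly, without building
--     # the intermediate decimal-encoded base-7 integer.
--     def oddCount7(n):
--         c = 0
--         while n != 0:
--             if (n % 7) % 2 == 1:
--                 c += 1
--             n //= 7
--         return c
--     return oddCount7(num1) == oddCount7(num2)
-- ===== Notes on version B (the rewrite author's own statement) =====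
-- stated objective: simpler
-- what changed: B counts odd base-7 digits in a single extraction pass per number, instead of A's two-stage approach of first building a decimal-encoded base-7 integer and then scanning its decimal digits for odd ones.
import Mathlib
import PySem

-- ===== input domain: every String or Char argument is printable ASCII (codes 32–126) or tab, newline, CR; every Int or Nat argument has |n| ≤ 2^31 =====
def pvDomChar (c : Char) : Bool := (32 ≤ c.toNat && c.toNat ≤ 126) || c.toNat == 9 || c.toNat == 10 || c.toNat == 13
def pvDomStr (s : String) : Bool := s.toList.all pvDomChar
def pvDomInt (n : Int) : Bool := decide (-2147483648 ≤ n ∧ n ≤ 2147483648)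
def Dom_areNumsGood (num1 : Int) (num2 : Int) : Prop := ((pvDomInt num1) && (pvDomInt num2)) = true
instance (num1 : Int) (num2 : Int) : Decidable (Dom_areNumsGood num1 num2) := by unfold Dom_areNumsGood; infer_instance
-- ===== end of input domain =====

-- B counts odd base-7 digits in one pass instead of building the decimal-encoded
-- base-7 integer and then scanning its decimal digits (objective: simpler).

-- ===== PORT A =====
-- DecTo7Base: res, it = 0, 0; while n != 0: res += (n % 7) * 10**it; n //= 7; it += 1
-- fuel n.toNat+1 suffices on the nonnegative inputs Pre_ admits (n strictly shrinks).
def decTo7Base (fuel : Nat) (n res : Int) (it : Nat) : Int :=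
  match fuel with
  | 0 => res
  | f + 1 =>
    if n ≠ 0 then
      decTo7Base f (PySem.Int.floordiv n 7) (res + PySem.Int.mod n 7 * 10 ^ it) (it + 1)
    else res

-- while m != 0: if m % 2 == 1: odd += 1; m //= 10
def countOddDec (fuel : Nat) (m odd : Int) : Int :=
  match fuel with
  | 0 => odd
  | f + 1 =>
    if m ≠ 0 then
      countOddDec f (PySem.Int.floordiv m 10)
        (if PySem.Int.mod m 2 = 1 then odd + 1 else odd)
    else odd

def areNumsGood (num1 : Int) (num2 : Int) : Bool :=
  let num1_7 := decTo7Base (num1.toNat + 1) num1 0 0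
  let num2_7 := decTo7Base (num2.toNat + 1) num2 0 0
  let oddNumsInN1 := countOddDec (num1_7.toNat + 1) num1_7 0
  let oddNumsInN2 := countOddDec (num2_7.toNat + 1) num2_7 0
  if oddNumsInN1 = oddNumsInN2 then true else false

-- ===== PORT B =====
-- oddCount7: c = 0; while n != 0: if (n % 7) % 2 == 1: c += 1; n //= 7
def oddCount7 (fuel : Nat) (n c : Int) : Int :=
  match fuel with
  | 0 => c
  | f + 1 =>
    if n ≠ 0 then
      oddCount7 f (PySem.Int.floordiv n 7)
        (if PySem.Int.mod (PySem.Int.mod n 7) 2 = 1 then c + 1 else c)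
    else c

def areNumsGood_alt (num1 : Int) (num2 : Int) : Bool :=
  oddCount7 (num1.toNat + 1) num1 0 = oddCount7 (num2.toNat + 1) num2 0

-- ===== PRECONDITION & SPEC =====
-- Pre_ excludes negative inputs: there Python A's `n //= 7` loop never reaches 0
-- (it stalls at -1), so A diverges and returns nothing.
def Pre_areNumsGood (num1 : Int) (num2 : Int) : Prop := 0 ≤ num1 ∧ 0 ≤ num2
instance (num1 : Int) (num2 : Int) : Decidable (Pre_areNumsGood num1 num2) := by
  unfold Pre_areNumsGood; infer_instance
def pvWitness_areNumsGood : Int × Int := (348, 12)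

def Spec_areNumsGood (num1 : Int) (num2 : Int) (out : Bool) : Prop := out = areNumsGood_alt num1 num2
instance (num1 : Int) (num2 : Int) (out : Bool) : Decidable (Spec_areNumsGood num1 num2 out) := by
  unfold Spec_areNumsGood; infer_instance

-- ===== CLAIM (what is proved, stated in full; the proofs are below) =====
def Claim_equal_areNumsGood : Prop := ∀ (num1 : Int) (num2 : Int), Dom_areNumsGood num1 num2 → Pre_areNumsGood num1 num2 → Spec_areNumsGood num1 num2 (areNumsGood num1 num2)

-- ===== LEMMAS AND PROOFS =====

-- mathematical digit functions (proof-side only)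
def enc7 (n : Nat) : Nat :=
  if h : n = 0 then 0 else n % 7 + 10 * enc7 (n / 7)
decreasing_by exact Nat.div_lt_self (Nat.pos_of_ne_zero h) (by omega)

def c10 (m : Nat) : Nat :=
  if h : m = 0 then 0 else (if m % 2 = 1 then 1 else 0) + c10 (m / 10)
decreasing_by exact Nat.div_lt_self (Nat.pos_of_ne_zero h) (by omega)

def c7 (n : Nat) : Nat :=
  if h : n = 0 then 0 else (if n % 7 % 2 = 1 then 1 else 0) + c7 (n / 7)
decreasing_by exact Nat.div_lt_self (Nat.pos_of_ne_zero h) (by omega)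

lemma decTo7Base_eq (fuel : Nat) : ∀ (n : Nat) (res : Int) (it : Nat), n ≤ fuel →
    decTo7Base fuel (n : Int) res it = res + (enc7 n : Int) * 10 ^ it := by
  induction fuel with
  | zero =>
    intro n res it h
    have : n = 0 := by omega
    subst this
    simp [decTo7Base, enc7]
  | succ f ih =>
    intro n res it h
    by_cases h0 : n = 0
    · subst h0; simp [decTo7Base, enc7]
    · have hcast : ((n : Int) ≠ 0) := by exact_mod_cast h0
      have hdiv : PySem.Int.floordiv (n : Int) 7 = ((n / 7 : Nat) : Int) := by
        exact_mod_cast PySem.Int.floordiv_natCast n 7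
      have hmod : PySem.Int.mod (n : Int) 7 = ((n % 7 : Nat) : Int) := by
        exact_mod_cast PySem.Int.mod_natCast n 7
      have he : enc7 n = n % 7 + 10 * enc7 (n / 7) := by rw [enc7, dif_neg h0]
      rw [decTo7Base]
      simp only [hcast, ne_eq, not_false_eq_true, if_true, hdiv, hmod]
      rw [ih (n / 7) _ _ (by omega), he]
      push_cast
      ring

lemma countOddDec_eq (fuel : Nat) : ∀ (m : Nat) (odd : Int), m ≤ fuel →
    countOddDec fuel (m : Int) odd = odd + (c10 m : Int) := by
  induction fuel with
  | zero =>
    intro m odd h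
    have : m = 0 := by omega
    subst this
    simp [countOddDec, c10]
  | succ f ih =>
    intro m odd h
    by_cases h0 : m = 0
    · subst h0; simp [countOddDec, c10]
    · have hcast : ((m : Int) ≠ 0) := by exact_mod_cast h0
      have hdiv : PySem.Int.floordiv (m : Int) 10 = ((m / 10 : Nat) : Int) := by
        exact_mod_cast PySem.Int.floordiv_natCast m 10
      have hmod : PySem.Int.mod (m : Int) 2 = ((m % 2 : Nat) : Int) := by
        exact_mod_cast PySem.Int.mod_natCast m 2
      have he : c10 m = (if m % 2 = 1 then 1 else 0) + c10 (m / 10) := by rw [c10, dif_neg h0]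
      rw [countOddDec]
      simp only [hcast, ne_eq, not_false_eq_true, if_true, hdiv, hmod]
      rw [ih (m / 10) _ (by omega), he]
      by_cases hp : m % 2 = 1
      · rw [if_pos (show ((m % 2 : Nat) : Int) = 1 by exact_mod_cast hp), if_pos hp]
        push_cast; ring
      · rw [if_neg (show ¬ ((m % 2 : Nat) : Int) = 1 by exact_mod_cast hp), if_neg hp]
        push_cast; ring
  

lemma oddCount7_eq (fuel : Nat) : ∀ (n : Nat) (c : Int), n ≤ fuel →
    oddCount7 fuel (n : Int) c = c + (c7 n : Int) := by
  induction fuel with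
  | zero =>
    intro n c h
    have : n = 0 := by omega
    subst this
    simp [oddCount7, c7]
  | succ f ih =>
    intro n c h
    by_cases h0 : n = 0
    · subst h0; simp [oddCount7, c7]
    · have hcast : ((n : Int) ≠ 0) := by exact_mod_cast h0
      have hdiv : PySem.Int.floordiv (n : Int) 7 = ((n / 7 : Nat) : Int) := by
        exact_mod_cast PySem.Int.floordiv_natCast n 7
      have hmod7 : PySem.Int.mod (n : Int) 7 = ((n % 7 : Nat) : Int) := by
        exact_mod_cast PySem.Int.mod_natCast n 7
      have hmod2 : PySem.Int.mod ((n % 7 : Nat) : Int) 2 = ((n % 7 % 2 : Nat) : Int) := by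
        exact_mod_cast PySem.Int.mod_natCast (n % 7) 2
      have he : c7 n = (if n % 7 % 2 = 1 then 1 else 0) + c7 (n / 7) := by rw [c7, dif_neg h0]
      rw [oddCount7]
      simp only [hcast, ne_eq, not_false_eq_true, if_true, hdiv, hmod7, hmod2]
      rw [ih (n / 7) _ (by omega), he]
      by_cases hp : n % 7 % 2 = 1
      · rw [if_pos (show ((n % 7 % 2 : Nat) : Int) = 1 by exact_mod_cast hp), if_pos hp]
        push_cast; ring
      · rw [if_neg (show ¬ ((n % 7 % 2 : Nat) : Int) = 1 by exact_mod_cast hp), if_neg hp]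
        push_cast; ring

lemma enc7_ne_zero (n : Nat) (h : n ≠ 0) : enc7 n ≠ 0 := by
  induction n using Nat.strong_induction_on with
  | _ n ih =>
    rw [enc7]
    simp only [h, dite_false]
    by_cases h7 : n < 7
    · have : n % 7 = n := Nat.mod_eq_of_lt h7
      omega
    · have hd : n / 7 ≠ 0 := by
        have := Nat.div_pos (by omega : 7 ≤ n) (by omega : 0 < 7)
        omega
      have := ih (n / 7) (Nat.div_lt_self (by omega) (by omega)) hd
      omega

lemma c10_enc7 (n : Nat) : c10 (enc7 n) = c7 n := by
  induction n using Nat.strong_induction_on with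
  | _ n ih =>
    by_cases h0 : n = 0
    · subst h0; simp [enc7, c10, c7]
    · have hne := enc7_ne_zero n h0
      have henc : enc7 n = n % 7 + 10 * enc7 (n / 7) := by
        rw [enc7]; simp [h0]
      rw [c10, dif_neg hne]
      have hm7 : n % 7 < 7 := Nat.mod_lt _ (by omega)
      have hmod : enc7 n % 2 = n % 7 % 2 := by omega
      have hdiv : enc7 n / 10 = enc7 (n / 7) := by omega
      rw [hmod, hdiv, ih (n / 7) (Nat.div_lt_self (by omega) (by omega))]
      conv_rhs => rw [c7, dif_neg h0]

-- ===== VERDICT (by name: the statement is the Claim_ definition above) =====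
theorem areNumsGood_spec : Claim_equal_areNumsGood := by
  intro num1 num2 _hdom hpre
  obtain ⟨h1, h2⟩ := hpre
  unfold Spec_areNumsGood areNumsGood areNumsGood_alt
  obtain ⟨n1, rfl⟩ : ∃ m : Nat, num1 = (m : Int) := ⟨num1.toNat, (Int.toNat_of_nonneg h1).symm⟩
  obtain ⟨n2, rfl⟩ : ∃ m : Nat, num2 = (m : Int) := ⟨num2.toNat, (Int.toNat_of_nonneg h2).symm⟩
  have hA1 : decTo7Base (n1 + 1) (n1 : Int) 0 0 = (enc7 n1 : Int) := by
    rw [decTo7Base_eq _ n1 0 0 (by omega)]; simp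
  have hA2 : decTo7Base (n2 + 1) (n2 : Int) 0 0 = (enc7 n2 : Int) := by
    rw [decTo7Base_eq _ n2 0 0 (by omega)]; simp
  simp only [Int.toNat_natCast]
  simp only [hA1, hA2, Int.toNat_natCast]
  rw [countOddDec_eq _ (enc7 n1) 0 (by omega), countOddDec_eq _ (enc7 n2) 0 (by omega)]
  simp only [oddCount7_eq (n1 + 1) n1 0 (by omega), oddCount7_eq (n2 + 1) n2 0 (by omega)]
  simp only [zero_add, c10_enc7]
  by_cases h : c7 n1 = c7 n2
  · simp [h]
  · have : ¬ ((c7 n1 : Int) = (c7 n2 : Int)) := by exact_mod_cast h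
    simp [this]
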